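-- pv_equiv track=rewrite | github.com/mingliu68/Daily_Coding_Problem | Problem_Sets_500_599/DC_561_etsy_hard/array_to_binary_tree_arr.py | list_to_binary
-- ===== SOURCE A (Python) =====
-- import math
--
-- def list_to_binary(list):
--     if len(list) == 0:
--         return []
--     if len(list) <= 2:
--         return list
--     else:
--         center_index = math.floor(len(list) / 2)
--         left_tree = list[ : center_index]
--         right_tree = list[center_index+1 : ]
--         return [list[center_index]] + list_to_binary(left_tree) + list_to_binary(right_tree)
-- ===== SOURCE B (Python) =====
-- def list_to_binary(list):
--     out = []
--     stack = [(0, len(list))]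
--     while stack:
--         lo, hi = stack.pop()
--         n = hi - lo
--         if n == 0:
--             continue
--         if n <= 2:
--             out.extend(list[lo:hi])
--         else:
--             center = lo + n // 2
--             out.append(list[center])
--             stack.append((center + 1, hi))
--             stack.append((lo, center))
--     return out
-- ===== Notes on version B (the rewrite author's own statement) =====
-- stated objective: alternative
-- what changed: Replaced A's recursion on list slices (with slice-concatenation at every node) by an iterative loop over an explicit stack of (lo, hi) index ranges into the original list, appending to a single output accumulator.
import Mathlib
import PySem

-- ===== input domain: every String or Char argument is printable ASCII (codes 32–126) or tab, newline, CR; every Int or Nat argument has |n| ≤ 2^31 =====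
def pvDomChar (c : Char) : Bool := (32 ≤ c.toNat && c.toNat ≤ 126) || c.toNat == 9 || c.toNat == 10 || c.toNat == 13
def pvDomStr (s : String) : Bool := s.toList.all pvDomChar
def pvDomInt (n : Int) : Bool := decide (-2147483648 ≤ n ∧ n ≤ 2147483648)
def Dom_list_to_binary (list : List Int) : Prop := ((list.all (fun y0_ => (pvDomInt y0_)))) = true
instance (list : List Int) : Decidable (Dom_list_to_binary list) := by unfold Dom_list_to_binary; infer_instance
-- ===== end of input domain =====

-- B rebuilds the preorder sequence iteratively with an explicit stack of index ranges instead of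
-- A's recursion on list slices (objective: alternative decomposition, same output, same cost).

-- ===== PORT A =====
-- A's 'math.floor(len(list) / 2)' is exactly 'list.length / 2' (Nat division) for every list length
-- a float represents exactly (length < 2^53); 'list[center_index]' is in range here, so pyGetD is exact.
def list_to_binary (list : List Int) : List Int :=
  if list.length = 0 then []
  else if list.length ≤ 2 then list
  else
    [PySem.List.pyGetD list ((list.length / 2 : Nat) : Int) 0]
      ++ list_to_binary (PySem.List.slice list none (some ((list.length / 2 : Nat) : Int)))
      ++ list_to_binary (PySem.List.slice list (some (((list.length / 2 : Nat) : Int) + 1)) none)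
termination_by list.length
decreasing_by
  · simp only [PySem.List.slice_to_natCast, List.length_take]; omega
  · have : ((list.length / 2 : Nat) : Int) + 1 = (((list.length / 2 + 1 : Nat)) : Int) := by push_cast; ring
    rw [this, PySem.List.slice_from_natCast]
    simp only [List.length_drop]; omega

-- ===== PORT B =====
-- Measure used only for termination of the stack loop: total size of the pending ranges.
def lbStackSum (st : List (Nat × Nat)) : Nat := st.foldr (fun p s => (p.2 - p.1) + s) 0

-- The while-loop of Source B: pop a range (lo, hi); skip it, flush it, or emit the center and push
-- the two sub-ranges (left on top).  'list[center]' is in range whenever reached, so pyGetD is exact.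
def lbLoop (xs : List Int) : List (Nat × Nat) → List Int → List Int
  | [], out => out
  | (lo, hi) :: st, out =>
    if hi - lo = 0 then lbLoop xs st out
    else if hi - lo ≤ 2 then
      lbLoop xs st (out ++ PySem.List.slice xs (some (lo : Int)) (some (hi : Int)))
    else
      lbLoop xs ((lo, lo + (hi - lo) / 2) :: (lo + (hi - lo) / 2 + 1, hi) :: st)
        (out ++ [PySem.List.pyGetD xs ((lo + (hi - lo) / 2 : Nat) : Int) 0])
termination_by st _ => 2 * lbStackSum st + st.length
decreasing_by all_goals simp only [lbStackSum, List.foldr_cons, List.length_cons]; omega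

def list_to_binary_alt (list : List Int) : List Int := lbLoop list [(0, list.length)] []

-- ===== PRECONDITION & SPEC =====
def Spec_list_to_binary (list : List Int) (out : List Int) : Prop := out = list_to_binary_alt list
instance (list : List Int) (out : List Int) : Decidable (Spec_list_to_binary list out) := by unfold Spec_list_to_binary; infer_instance

-- ===== CLAIM (what is proved, stated in full; the proofs are below) =====
def Claim_equal_list_to_binary : Prop := ∀ (list : List Int), Dom_list_to_binary list → Spec_list_to_binary list (list_to_binary list)

-- ===== LEMMAS AND PROOFS =====

-- Popping one range (lo, hi) with hi ≤ |xs| appends exactly A's preorder of the segment xs[lo:hi].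
lemma lbLoop_seg (xs : List Int) :
    ∀ n lo hi, hi - lo = n → hi ≤ xs.length → ∀ (st : List (Nat × Nat)) (out : List Int),
      lbLoop xs ((lo, hi) :: st) out
        = lbLoop xs st (out ++ list_to_binary (PySem.List.slice xs (some (lo : Int)) (some (hi : Int)))) := by
  intro n
  induction n using Nat.strong_induction_on with
  | _ n ih =>
  intro lo hi hn hhi st out
  have hs : PySem.List.slice xs (some (lo : Int)) (some (hi : Int)) = (xs.drop lo).take (hi - lo) :=
    PySem.List.slice_natCast xs lo hi
  have hslen : (PySem.List.slice xs (some (lo : Int)) (some (hi : Int))).length = hi - lo := by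
    rw [hs]; simp only [List.length_take, List.length_drop]; omega
  by_cases h0 : hi - lo = 0
  · have hnil : PySem.List.slice xs (some (lo : Int)) (some (hi : Int)) = [] :=
      List.eq_nil_of_length_eq_zero (hslen.trans h0)
    rw [lbLoop, if_pos h0, hnil, list_to_binary]
    simp
  · by_cases h2 : hi - lo ≤ 2
    · rw [lbLoop, if_neg h0, if_pos h2]
      rw [list_to_binary, if_neg (by omega : ¬ _ = 0)]
      rw [if_pos (by omega : _ ≤ 2)]
    · -- recursive case: n = hi - lo > 2, center = lo + (hi-lo)/2
      rw [lbLoop, if_neg h0, if_neg h2]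
      rw [ih ((hi - lo) / 2) (by omega) lo (lo + (hi - lo) / 2) (by omega) (by omega) _ _]
      rw [ih (hi - (lo + (hi - lo) / 2 + 1)) (by omega) (lo + (hi - lo) / 2 + 1) hi rfl hhi st _]
      have hA : list_to_binary (PySem.List.slice xs (some (lo : Int)) (some (hi : Int)))
          = [PySem.List.pyGetD (PySem.List.slice xs (some (lo : Int)) (some (hi : Int)))
                (((hi - lo) / 2 : Nat) : Int) 0]
            ++ list_to_binary (PySem.List.slice (PySem.List.slice xs (some (lo : Int)) (some (hi : Int)))
                none (some (((hi - lo) / 2 : Nat) : Int)))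
            ++ list_to_binary (PySem.List.slice (PySem.List.slice xs (some (lo : Int)) (some (hi : Int)))
                (some ((((hi - lo) / 2 : Nat) : Int) + 1)) none) := by
        rw [list_to_binary, if_neg (by rw [hslen]; omega), if_neg (by rw [hslen]; omega), hslen]
      rw [hA]
      congr 1
      -- out ++ [g] ++ A(left) ++ A(right) = out ++ ([g'] ++ A(left') ++ A(right'))
      have hget : PySem.List.pyGetD (PySem.List.slice xs (some (lo : Int)) (some (hi : Int)))
            (((hi - lo) / 2 : Nat) : Int) 0
          = PySem.List.pyGetD xs ((lo + (hi - lo) / 2 : Nat) : Int) 0 := by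
        rw [PySem.List.pyGetD_natCast, PySem.List.pyGetD_natCast, hs,
            List.getD_eq_getElem?_getD, List.getD_eq_getElem?_getD,
            List.getElem?_take_of_lt (by omega), List.getElem?_drop]
      have hleft : PySem.List.slice (PySem.List.slice xs (some (lo : Int)) (some (hi : Int)))
            none (some (((hi - lo) / 2 : Nat) : Int))
          = PySem.List.slice xs (some (lo : Int)) (some ((lo + (hi - lo) / 2 : Nat) : Int)) := by
        rw [PySem.List.slice_to_natCast, hs, List.take_take,
            PySem.List.slice_natCast xs lo (lo + (hi - lo) / 2)]
        congr 1
        omega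
      have hright : PySem.List.slice (PySem.List.slice xs (some (lo : Int)) (some (hi : Int)))
            (some ((((hi - lo) / 2 : Nat) : Int) + 1)) none
          = PySem.List.slice xs (some ((lo + (hi - lo) / 2 + 1 : Nat) : Int)) (some ((hi : Nat) : Int)) := by
        have hc : (((hi - lo) / 2 : Nat) : Int) + 1 = (((hi - lo) / 2 + 1 : Nat) : Int) := by push_cast; ring
        rw [hc, PySem.List.slice_from_natCast, hs, List.drop_take, List.drop_drop,
            PySem.List.slice_natCast xs (lo + (hi - lo) / 2 + 1) hi]
        congr 1
        omega
      rw [hget, hleft, hright]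
      simp [List.append_assoc]

theorem list_to_binary_spec : Claim_equal_list_to_binary := by
  intro list _
  unfold Spec_list_to_binary list_to_binary_alt
  rw [lbLoop_seg list list.length 0 list.length (by omega) (by omega)]
  simp [lbLoop]
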